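-- pv_equiv track=rewrite | github.com/sedlacekradek/Algorithms | codility/06/NumberOfDiscIntersections.py | fast_solution
-- ===== SOURCE A (Python) =====
-- def fast_solution(A):
--     # interval solution through counting simultaneously open intervals
--
--     # edge case limit constant
--     MAX_INTERSECTIONS = 10000000
--
--     openings = []
--     closings = []
--
--     # create 2 lists with values when intervals open and close
--     for i, n in enumerate(A):
--         openings.append(i-n)
--         closings.append(i+n)
--
--     # O (n log n)
--     openings.sort()  # -4, -1, 0, 0, 2 ,5
--     closings.sort()  # 1, 4, 4, 5, 6, 8
--
--     # count how many intervals are open at any point an interval is closed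
--     iopening = 0
--     res = 0
--     for iclosing in range(0, len(closings)):
--         while iopening < len(openings) and openings[iopening] <= closings[iclosing]:
--             iopening += 1
--
--         res += iopening - iclosing - 1
--         # check for edge case
--         if res > MAX_INTERSECTIONS:
--             return -1
--
--     return res
-- ===== SOURCE B (Python) =====
-- def fast_solution(A):
--     # single sorted event-stream sweep instead of two sorted arrays with a nested two-pointer scan
--     MAX_INTERSECTIONS = 10000000
--
--     # encode each event as one integer: 2*coord for an opening, 2*coord+1 for a closing,
--     # so plain sorting orders by coordinate with openings before closings on ties
--     events = []
--     for i, n in enumerate(A):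
--         events.append(2 * (i - n))
--         events.append(2 * (i + n) + 1)
--     events.sort()
--
--     res = 0
--     curr_open = 0
--     closed = 0
--     for e in events:
--         if e % 2 == 0:
--             curr_open += 1
--         else:
--             res += curr_open - closed - 1
--             if res > MAX_INTERSECTIONS:
--                 return -1
--             closed += 1
--     return res
-- ===== Notes on version B (the rewrite author's own statement) =====
-- stated objective: alternative
-- what changed: Replaced the two separately sorted openings/closings arrays with a nested two-pointer while-loop by a single sorted list of integer-encoded events (2*coord for an opening, 2*coord+1 for a closing, so ties put openings first) swept once with two running counters.
import Mathlib
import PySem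

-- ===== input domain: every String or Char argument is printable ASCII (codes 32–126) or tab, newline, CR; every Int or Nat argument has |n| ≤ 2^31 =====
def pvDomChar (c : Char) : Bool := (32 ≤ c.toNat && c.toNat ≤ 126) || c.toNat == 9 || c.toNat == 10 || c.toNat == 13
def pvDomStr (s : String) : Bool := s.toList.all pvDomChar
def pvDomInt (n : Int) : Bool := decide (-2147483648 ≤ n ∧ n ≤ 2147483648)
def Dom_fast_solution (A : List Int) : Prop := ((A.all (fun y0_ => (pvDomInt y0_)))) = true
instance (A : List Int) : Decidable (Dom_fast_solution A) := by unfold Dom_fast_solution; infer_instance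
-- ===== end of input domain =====

-- B replaces A's two sorted arrays with a nested two-pointer scan by ONE sorted integer event
-- stream (2*coord for an opening, 2*coord+1 for a closing) folded once with two counters;
-- objective: alternative decomposition of the same O(n log n) sweep.

-- ===== PORT A =====

-- the inner 'while iopening < len(openings) and openings[iopening] <= closings[iclosing]'
-- (the getD default 0 is never read: the guard keeps the index in range, exactly as in Python)
def pvWhileA (os : List Int) (c : Int) (i : Nat) : Nat :=
  if i < os.length ∧ os.getD i 0 ≤ c then pvWhileA os c (i + 1) else i
termination_by os.length - i
decreasing_by omega

def pvForA (os cs : List Int) (j i : Nat) (res maxI : Int) : Int :=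
  if j < cs.length then
    let i' := pvWhileA os (cs.getD j 0) i
    let res' := res + (i' : Int) - (j : Int) - 1
    if res' > maxI then -1 else pvForA os cs (j + 1) i' res' maxI
  else res
termination_by cs.length - j
decreasing_by omega

def fast_solution (A : List Int) : Int :=
  let maxI : Int := 10000000
  -- 'for i, n in enumerate(A): openings.append(i-n); closings.append(i+n)'
  let oc := (PySem.List.enumerate A 0).foldl
      (fun s p => (s.1 ++ [p.1 - p.2], s.2 ++ [p.1 + p.2])) ([], [])
  let os := PySem.List.sorted oc.1 (fun x => x) false
  let cs := PySem.List.sorted oc.2 (fun x => x) false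
  pvForA os cs 0 0 0 maxI

-- ===== PORT B =====

-- 'for e in events: ...' with the early 'return -1'
def pvSweepB (evs : List Int) (curr closed res maxI : Int) : Int :=
  match evs with
  | [] => res
  | e :: rest =>
    if PySem.Int.mod e 2 = 0 then pvSweepB rest (curr + 1) closed res maxI
    else
      let res' := res + curr - closed - 1
      if res' > maxI then -1 else pvSweepB rest curr (closed + 1) res' maxI

def fast_solution_alt (A : List Int) : Int :=
  let maxI : Int := 10000000
  -- 'for i, n in enumerate(A): events.append(2*(i-n)); events.append(2*(i+n)+1)'
  let events := (PySem.List.enumerate A 0).foldl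
      (fun s p => s ++ [2 * (p.1 - p.2), 2 * (p.1 + p.2) + 1]) []
  pvSweepB (PySem.List.sorted events (fun x => x) false) 0 0 0 maxI

-- ===== PRECONDITION & SPEC =====
def Spec_fast_solution (A : List Int) (out : Int) : Prop := out = fast_solution_alt A
instance (A : List Int) (out : Int) : Decidable (Spec_fast_solution A out) := by unfold Spec_fast_solution; infer_instance

-- ===== CLAIM (what is proved, stated in full; the proofs are below) =====
def Claim_equal_fast_solution : Prop := ∀ (A : List Int), Dom_fast_solution A → Spec_fast_solution A (fast_solution A)

-- ===== LEMMAS AND PROOFS =====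

-- merge of two event streams: take left while x ≤ y (ties go left = openings first)
def pvMerge (xs ys : List Int) : List Int :=
  match xs, ys with
  | [], ys => ys
  | xs, [] => xs
  | x :: xs', y :: ys' =>
    if x ≤ y then x :: pvMerge xs' (y :: ys') else y :: pvMerge (x :: xs') ys'

theorem pvMerge_perm (xs ys : List Int) : (pvMerge xs ys).Perm (xs ++ ys) := by
  fun_induction pvMerge with
  | case1 ys => simp
  | case2 xs h => simp
  | case3 x xs' y ys' h ih => simpa using ih.cons x
  | case4 x xs' y ys' h ih => exact (ih.cons y).trans (List.Perm.symm List.perm_middle)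

theorem mem_pvMerge {z : Int} {xs ys : List Int} (h : z ∈ pvMerge xs ys) : z ∈ xs ∨ z ∈ ys := by
  have := (pvMerge_perm xs ys).mem_iff.1 h
  simpa using this

theorem pvMerge_pairwise (xs ys : List Int)
    (hx : xs.Pairwise (· ≤ ·)) (hy : ys.Pairwise (· ≤ ·)) :
    (pvMerge xs ys).Pairwise (· ≤ ·) := by
  fun_induction pvMerge with
  | case1 ys => exact hy
  | case2 xs h => exact hx
  | case3 x xs' y ys' h ih =>
      refine List.pairwise_cons.2 ⟨?_, ih (List.pairwise_cons.1 hx).2 hy⟩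
      intro z hz
      rcases mem_pvMerge hz with hz | hz
      · exact (List.pairwise_cons.1 hx).1 z hz
      · rcases List.mem_cons.1 hz with rfl | hz
        · exact h
        · exact le_trans h ((List.pairwise_cons.1 hy).1 z hz)
  | case4 x xs' y ys' h ih =>
      refine List.pairwise_cons.2 ⟨?_, ih hx (List.pairwise_cons.1 hy).2⟩
      intro z hz
      have hyx : y ≤ x := le_of_not_ge h
      rcases mem_pvMerge hz with hz | hz
      · rcases List.mem_cons.1 hz with rfl | hz
        · exact hyx
        · exact le_trans hyx ((List.pairwise_cons.1 hx).1 z hz)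
      · exact (List.pairwise_cons.1 hy).1 z hz

theorem pvOC_eq (A : List Int) (o c : List Int) :
    (PySem.List.enumerate A 0).foldl
      (fun s p => (s.1 ++ [p.1 - p.2], s.2 ++ [p.1 + p.2])) (o, c) =
    (o ++ (PySem.List.enumerate A 0).map (fun p => p.1 - p.2),
     c ++ (PySem.List.enumerate A 0).map (fun p => p.1 + p.2)) := by
  generalize PySem.List.enumerate A 0 = l
  induction l generalizing o c with
  | nil => simp
  | cons p t ih => simp [List.foldl_cons, ih]

theorem pvEvents_perm (A : List Int) :
    ((PySem.List.enumerate A 0).foldl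
      (fun s p => s ++ [2 * (p.1 - p.2), 2 * (p.1 + p.2) + 1]) []).Perm
    (((PySem.List.enumerate A 0).map (fun p => p.1 - p.2)).map (fun x => 2 * x) ++
     ((PySem.List.enumerate A 0).map (fun p => p.1 + p.2)).map (fun x => 2 * x + 1)) := by
  rw [PySem.List.foldl_append_eq_flatMap]
  generalize PySem.List.enumerate A 0 = l
  induction l with
  | nil => simp
  | cons p t ih =>
      simp only [List.flatMap_cons, List.map_cons, List.nil_append]
      refine List.Perm.trans (by exact (List.Perm.cons _ (List.Perm.cons _ ih))) ?_
      exact List.Perm.symm ((List.perm_middle).cons _)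

theorem pvWhileA_eq (os : List Int) (c : Int) (i : Nat) :
    pvWhileA os c i = i + ((os.drop i).takeWhile (fun x => decide (x ≤ c))).length := by
  fun_induction pvWhileA with
  | case1 i h ih =>
      obtain ⟨hl, hle⟩ := h
      have hd : os.drop i = os[i] :: os.drop (i + 1) := List.drop_eq_getElem_cons hl
      have hg : os.getD i 0 = os[i] := List.getD_eq_getElem os 0 hl
      rw [ih, hd]
      simp only [List.takeWhile_cons, decide_eq_true_eq]
      rw [if_pos (hg ▸ hle)]
      simp; omega
  | case2 i h =>
      rcases Nat.lt_or_ge i os.length with hl | hl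
      · have hd : os.drop i = os[i] :: os.drop (i + 1) := List.drop_eq_getElem_cons hl
        have hg : os.getD i 0 = os[i] := List.getD_eq_getElem os 0 hl
        have hn : ¬ os[i] ≤ c := by intro hc; exact h ⟨hl, hg ▸ hc⟩
        rw [hd]
        simp only [List.takeWhile_cons, decide_eq_true_eq]
        rw [if_neg hn]
        simp
      · rw [List.drop_eq_nil_of_le hl]; simp

theorem pvMerge_nil_right (xs : List Int) : pvMerge xs [] = xs := by
  cases xs <;> simp [pvMerge]

theorem pvSweep_evens (t rest : List Int) (curr closed res maxI : Int) :
    pvSweepB (t.map (fun x => 2 * x) ++ rest) curr closed res maxI =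
      pvSweepB rest (curr + (t.length : Int)) closed res maxI := by
  induction t generalizing curr with
  | nil => simp
  | cons x t' ih =>
      have hev : PySem.Int.mod (2 * x) 2 = 0 :=
        (PySem.Int.mod_eq_zero_iff_dvd _ _).2 ⟨x, rfl⟩
      simp only [List.map_cons, List.cons_append, pvSweepB, hev, if_pos]
      rw [ih]
      have : curr + 1 + (t'.length : Int) = curr + ((t'.length + 1 : Nat) : Int) := by
        push_cast; ring
      rw [this]
      simp

theorem pvMerge_split (os₂ : List Int) (c : Int) (cs' : List Int) :
    pvMerge (os₂.map (fun x => 2 * x)) ((c :: cs').map (fun x => 2 * x + 1)) =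
      ((os₂.takeWhile (fun x => decide (x ≤ c))).map (fun x => 2 * x)) ++
      (2 * c + 1) ::
        pvMerge ((os₂.dropWhile (fun x => decide (x ≤ c))).map (fun x => 2 * x))
          (cs'.map (fun x => 2 * x + 1)) := by
  induction os₂ with
  | nil => simp [pvMerge]
  | cons x os' ih =>
      by_cases hxc : x ≤ c
      · have hle : (2 : Int) * x ≤ 2 * c + 1 := by omega
        simp only [List.map_cons, pvMerge, if_pos hle, List.takeWhile_cons,
          List.dropWhile_cons, decide_eq_true_eq, hxc, if_pos]
        simp only [List.cons_append]
        exact congrArg _ ih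
      · have hgt : ¬ (2 : Int) * x ≤ 2 * c + 1 := by omega
        simp only [List.map_cons, pvMerge, if_neg hgt, List.takeWhile_cons,
          List.dropWhile_cons, decide_eq_true_eq]
        simp [hxc]

theorem pvSim (cs os osF csF : List Int) (i j : Nat)
    (hos : osF.drop i = os) (hcs : csF.drop j = cs) (hi : i ≤ osF.length)
    (res maxI : Int) :
    pvForA osF csF j i res maxI =
      pvSweepB (pvMerge (os.map (fun x => 2 * x)) (cs.map (fun x => 2 * x + 1)))
        (i : Int) (j : Int) res maxI := by
  induction cs generalizing os i j res with
  | nil =>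
      have hj : ¬ j < csF.length := by
        have := congrArg List.length hcs; simp at this; omega
      rw [pvForA, if_neg hj]
      rw [List.map_nil, pvMerge_nil_right]
      have h1 := pvSweep_evens os [] (i : Int) (j : Int) res maxI
      simp only [List.append_nil] at h1
      rw [h1]
      simp [pvSweepB]
  | cons ccur cs' ih =>
      have hlen : csF.length - j = cs'.length + 1 := by
        have := congrArg List.length hcs; simpa using this
      have hjlen : j < csF.length := by omega
      have hget : csF.getD j 0 = ccur := by
        have h0 : (csF.drop j)[0]'(by rw [hcs]; simp) = ccur := by
          simp [hcs]
        rw [List.getElem_drop] at h0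
        rw [List.getD_eq_getElem csF 0 (by omega)]
        simpa using h0
      have hoslen : os.length = osF.length - i := by
        have := congrArg List.length hos; simpa using this.symm
      rw [pvForA, if_pos hjlen]
      simp only [hget]
      rw [pvWhileA_eq, hos]
      set t := os.takeWhile (fun x => decide (x ≤ ccur)) with ht
      set r := os.dropWhile (fun x => decide (x ≤ ccur)) with hr
      rw [pvMerge_split]
      rw [pvSweep_evens]
      have hodd : ¬ PySem.Int.mod (2 * ccur + 1) 2 = 0 := by
        intro hmod
        rcases (PySem.Int.mod_eq_zero_iff_dvd _ _).1 hmod with ⟨k, hk⟩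
        omega
      have hcast : ((i + t.length : Nat) : Int) = (i : Int) + (t.length : Int) := by
        push_cast; ring
      have htr : t ++ r = os := List.takeWhile_append_dropWhile
      have htlen : t.length ≤ os.length := by
        have := congrArg List.length htr; simp at this; omega
      have hos' : osF.drop (i + t.length) = r := by
        rw [← List.drop_drop, hos, ← htr, List.drop_left]
      have hcs' : csF.drop (j + 1) = cs' := by
        rw [← List.drop_drop, hcs, List.drop_one, List.tail_cons]
      have hi' : i + t.length ≤ osF.length := by omega
      have hIH := ih r (i + t.length) (j + 1) hos' hcs' hi' (res + ((i : Int) + (t.length : Int)) - (j : Int) - 1)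
      conv_rhs => simp only [pvSweepB]
      rw [if_neg hodd, hcast]
      split_ifs with hmax
      · rfl
      · rw [hIH, hcast]
        push_cast
        rfl

-- ===== VERDICT (by name: the statement is the Claim_ definition above) =====
theorem fast_solution_spec : Claim_equal_fast_solution := by
  intro A _
  unfold Spec_fast_solution fast_solution fast_solution_alt
  simp only [pvOC_eq, List.nil_append]
  have hsorted :
      PySem.List.sorted
        ((PySem.List.enumerate A 0).foldl
          (fun s p => s ++ [2 * (p.1 - p.2), 2 * (p.1 + p.2) + 1]) [])
        (fun x => x) false =
      pvMerge
        ((PySem.List.sorted ((PySem.List.enumerate A 0).map (fun p => p.1 - p.2)) (fun x => x) false).map (fun x => 2 * x))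
        ((PySem.List.sorted ((PySem.List.enumerate A 0).map (fun p => p.1 + p.2)) (fun x => x) false).map (fun x => 2 * x + 1)) := by
    apply PySem.List.sorted_id_eq_of_perm_of_pairwise
    · exact (pvMerge_perm _ _).trans
        ((((PySem.List.sorted_perm _ _ _).map _).append ((PySem.List.sorted_perm _ _ _).map _)).trans
          (pvEvents_perm A).symm)
    · apply pvMerge_pairwise
      · exact List.pairwise_map.2 ((PySem.List.sorted_pairwise _ _).imp (by intro a b h; omega))
      · exact List.pairwise_map.2 ((PySem.List.sorted_pairwise _ _).imp (by intro a b h; omega))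
  rw [hsorted]
  have := pvSim
      (PySem.List.sorted ((PySem.List.enumerate A 0).map (fun p => p.1 + p.2)) (fun x => x) false)
      (PySem.List.sorted ((PySem.List.enumerate A 0).map (fun p => p.1 - p.2)) (fun x => x) false)
      (PySem.List.sorted ((PySem.List.enumerate A 0).map (fun p => p.1 - p.2)) (fun x => x) false)
      (PySem.List.sorted ((PySem.List.enumerate A 0).map (fun p => p.1 + p.2)) (fun x => x) false)
      0 0 rfl rfl (Nat.zero_le _) 0 10000000
  simpa using this
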